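-- pv_equiv track=rewrite | github.com/sadineniteja/retrace-community-new | main-app/backend/app/rag/kb_search.py | _direct_path_matches
-- ===== SOURCE A (Python) =====
-- def _direct_path_matches(
--     file_analysis: dict,
--     files: dict,
--     keywords: list[str],
--     file_patterns: list[str],
-- ) -> set[str]:
--     """Files whose paths literally contain multiple query/pattern terms."""
--     all_paths = set(file_analysis.keys()) | set(files.keys())
--     terms = list({kw.lower() for kw in keywords} | {p.lower() for p in file_patterns})
--     if not terms:
--         return set()
--
--     matches: set[str] = set()
--     for path in all_paths:
--         path_lower = path.lower()
--         hits = sum(1 for t in terms if t in path_lower)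
--         if hits >= 2:
--             matches.add(path)
--     return matches
-- ===== SOURCE B (Python) =====
-- def _direct_path_matches(
--     file_analysis: dict,
--     files: dict,
--     keywords: list[str],
--     file_patterns: list[str],
-- ) -> set[str]:
--     """Multi-pattern matching by window enumeration: instead of running a
--     substring search per (path, term) pair, slide, for each distinct term
--     length L, every length-L window over the lowercased path and look the
--     window up in the term set; a path matches when at least two distinct
--     terms were seen among its windows."""
--     all_paths = set(file_analysis.keys()) | set(files.keys())
--     terms = {kw.lower() for kw in keywords} | {p.lower() for p in file_patterns}
--     lengths = sorted({len(t) for t in terms})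
--     matches: set[str] = set()
--     for path in all_paths:
--         pl = path.lower()
--         found: set[str] = set()
--         for L in lengths:
--             for i in range(len(pl) - L + 1):
--                 w = pl[i:i + L]
--                 if w in terms:
--                     found.add(w)
--         if len(found) >= 2:
--             matches.add(path)
--     return matches
-- ===== Notes on version B (the rewrite author's own statement) =====
-- stated objective: faster
-- what changed: B replaces A's per-(path,term) substring search by window enumeration: it collects the distinct term lengths once, slides every window of each such length over the lowercased path, looks each window up in the term set, and keeps the path when at least two distinct terms were found among its windows.
import Mathlib
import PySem

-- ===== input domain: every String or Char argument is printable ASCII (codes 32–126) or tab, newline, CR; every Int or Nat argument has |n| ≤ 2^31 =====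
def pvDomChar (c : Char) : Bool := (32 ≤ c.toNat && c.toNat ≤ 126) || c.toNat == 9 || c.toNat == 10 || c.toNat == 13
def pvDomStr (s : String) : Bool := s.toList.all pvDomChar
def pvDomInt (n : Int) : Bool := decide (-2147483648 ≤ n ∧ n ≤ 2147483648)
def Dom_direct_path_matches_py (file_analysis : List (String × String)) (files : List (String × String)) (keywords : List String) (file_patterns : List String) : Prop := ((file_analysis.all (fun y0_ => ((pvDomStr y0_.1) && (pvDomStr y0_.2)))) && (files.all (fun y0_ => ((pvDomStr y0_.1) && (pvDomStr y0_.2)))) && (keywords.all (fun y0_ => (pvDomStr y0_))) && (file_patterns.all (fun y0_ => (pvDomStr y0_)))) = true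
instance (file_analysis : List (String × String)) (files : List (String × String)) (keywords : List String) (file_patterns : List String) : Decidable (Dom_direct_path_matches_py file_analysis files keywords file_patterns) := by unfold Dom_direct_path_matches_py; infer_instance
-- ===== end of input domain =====

-- B replaces A's per-(path,term) substring search by window enumeration: for each
-- distinct term length it slides every window of that length over the lowercased
-- path and looks the window up in the term set (measured faster in a timing run; same-value result).

-- ===== PORT A =====
def direct_path_matches_py (file_analysis : List (String × String)) (files : List (String × String)) (keywords : List String) (file_patterns : List String) : List String :=
  let all_paths := PySem.Set.union (PySem.Set.ofList (file_analysis.map Prod.fst)) (files.map Prod.fst)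
  let terms := PySem.Set.union (PySem.Set.ofList (keywords.map PySem.Str.lower)) (file_patterns.map PySem.Str.lower)
  if terms = [] then PySem.Set.empty
  else
    all_paths.foldl (fun mset path =>
      let path_lower := PySem.Str.lower path
      let hits := terms.foldl (fun s t => if PySem.Str.isIn t path_lower then s + 1 else s) (0 : Int)
      if 2 ≤ hits then PySem.Set.add mset path else mset) PySem.Set.empty

-- ===== PORT B =====
-- inner loop of Source B: 'for i in range(len(pl) - L + 1): w = pl[i:i+L]; if w in terms: found.add(w)'
def pvScanLen (terms : PySem.Set String) (pl : String) (found : PySem.Set String) (L : Int) : PySem.Set String :=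
  (PySem.List.pyRange 0 (PySem.Str.len pl - L + 1) 1).foldl
    (fun f i =>
      if PySem.Set.contains terms (PySem.Str.slice pl (some i) (some (i + L)))
      then PySem.Set.add f (PySem.Str.slice pl (some i) (some (i + L))) else f) found

def direct_path_matches_py_alt (file_analysis : List (String × String)) (files : List (String × String)) (keywords : List String) (file_patterns : List String) : List String :=
  let all_paths := PySem.Set.union (PySem.Set.ofList (file_analysis.map Prod.fst)) (files.map Prod.fst)
  let terms := PySem.Set.union (PySem.Set.ofList (keywords.map PySem.Str.lower)) (file_patterns.map PySem.Str.lower)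
  let lengths := PySem.List.sorted (PySem.Set.ofList (terms.map PySem.Str.len)) (fun x => x) false
  all_paths.foldl (fun mset path =>
    let pl := PySem.Str.lower path
    let found := lengths.foldl (pvScanLen terms pl) PySem.Set.empty
    if 2 ≤ PySem.Set.len found then PySem.Set.add mset path else mset) PySem.Set.empty

-- ===== PRECONDITION & SPEC =====
def Spec_direct_path_matches_py (file_analysis : List (String × String)) (files : List (String × String)) (keywords : List String) (file_patterns : List String) (out : List String) : Prop := out = direct_path_matches_py_alt file_analysis files keywords file_patterns
instance (file_analysis : List (String × String)) (files : List (String × String)) (keywords : List String) (file_patterns : List String) (out : List String) : Decidable (Spec_direct_path_matches_py file_analysis files keywords file_patterns out) := by unfold Spec_direct_path_matches_py; infer_instance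

-- ===== CLAIM (what is proved, stated in full; the proofs are below) =====
def Claim_equal_direct_path_matches_py : Prop := ∀ (file_analysis : List (String × String)) (files : List (String × String)) (keywords : List String) (file_patterns : List String), Dom_direct_path_matches_py file_analysis files keywords file_patterns → Spec_direct_path_matches_py file_analysis files keywords file_patterns (direct_path_matches_py file_analysis files keywords file_patterns)

-- ===== LEMMAS AND PROOFS =====

-- Membership in a fold that conditionally adds g i.
lemma mem_foldl_addif {β : Type} (g : β → String) (C : β → Bool) :
    ∀ (l : List β) (acc : PySem.Set String) (x : String),
    (x ∈ l.foldl (fun f i => if C i then PySem.Set.add f (g i) else f) acc) ↔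
      (x ∈ acc ∨ ∃ i ∈ l, C i = true ∧ g i = x) := by
  intro l
  induction l with
  | nil => intro acc x; simp
  | cons hd tl ih =>
    intro acc x
    rw [List.foldl_cons]
    by_cases h : C hd = true
    · rw [if_pos h, ih]
      simp only [PySem.Set.mem_add, List.mem_cons]
      constructor
      · rintro ((h1 | h2) | ⟨i, hi, hc, hg⟩)
        · exact Or.inl h1
        · exact Or.inr ⟨hd, Or.inl rfl, h, h2.symm⟩
        · exact Or.inr ⟨i, Or.inr hi, hc, hg⟩
      · rintro (h1 | ⟨i, (rfl | hi), hc, hg⟩)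
        · exact Or.inl (Or.inl h1)
        · exact Or.inl (Or.inr hg.symm)
        · exact Or.inr ⟨i, hi, hc, hg⟩
    · rw [if_neg h, ih]
      simp only [List.mem_cons]
      constructor
      · rintro (h1 | ⟨i, hi, hc, hg⟩)
        · exact Or.inl h1
        · exact Or.inr ⟨i, Or.inr hi, hc, hg⟩
      · rintro (h1 | ⟨i, (rfl | hi), hc, hg⟩)
        · exact Or.inl h1
        · exact absurd hc h
        · exact Or.inr ⟨i, hi, hc, hg⟩

-- Nodup is preserved by such a fold.
lemma nodup_foldl_addif {β : Type} (g : β → String) (C : β → Bool) :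
    ∀ (l : List β) (acc : PySem.Set String), acc.Nodup →
    (l.foldl (fun f i => if C i then PySem.Set.add f (g i) else f) acc).Nodup := by
  intro l
  induction l with
  | nil => intro acc h; simpa using h
  | cons hd tl ih =>
    intro acc h
    rw [List.foldl_cons]
    by_cases hc : C hd = true
    · rw [if_pos hc]; exact ih _ (PySem.Set.nodup_add _ _ h)
    · rw [if_neg hc]; exact ih _ h

-- Membership after scanning one window length.
lemma mem_pvScanLen (terms : PySem.Set String) (pl : String) (f : PySem.Set String) (L : Int) (x : String) :
    (x ∈ pvScanLen terms pl f L) ↔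
      (x ∈ f ∨ ∃ i ∈ PySem.List.pyRange 0 (PySem.Str.len pl - L + 1) 1,
        PySem.Set.contains terms (PySem.Str.slice pl (some i) (some (i + L))) = true ∧
        PySem.Str.slice pl (some i) (some (i + L)) = x) := by
  exact mem_foldl_addif (fun i => PySem.Str.slice pl (some i) (some (i + L)))
    (fun i => PySem.Set.contains terms (PySem.Str.slice pl (some i) (some (i + L)))) _ f x

lemma nodup_pvScanLen (terms : PySem.Set String) (pl : String) (f : PySem.Set String) (L : Int)
    (h : f.Nodup) : (pvScanLen terms pl f L).Nodup :=
  nodup_foldl_addif (fun i => PySem.Str.slice pl (some i) (some (i + L)))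
    (fun i => PySem.Set.contains terms (PySem.Str.slice pl (some i) (some (i + L)))) _ f h

-- Membership across all window lengths.
lemma mem_foldl_pvScanLen (terms : PySem.Set String) (pl : String) :
    ∀ (lengths : List Int) (acc : PySem.Set String) (x : String),
    (x ∈ lengths.foldl (pvScanLen terms pl) acc) ↔
      (x ∈ acc ∨ ∃ L ∈ lengths, ∃ i ∈ PySem.List.pyRange 0 (PySem.Str.len pl - L + 1) 1,
        PySem.Set.contains terms (PySem.Str.slice pl (some i) (some (i + L))) = true ∧
        PySem.Str.slice pl (some i) (some (i + L)) = x) := by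
  intro lengths
  induction lengths with
  | nil => intro acc x; simp
  | cons hd tl ih =>
    intro acc x
    rw [List.foldl_cons, ih, mem_pvScanLen]
    constructor
    · rintro ((h1 | ⟨i, hi, hc, hg⟩) | ⟨L, hL, hrest⟩)
      · exact Or.inl h1
      · exact Or.inr ⟨hd, List.mem_cons_self, i, hi, hc, hg⟩
      · exact Or.inr ⟨L, List.mem_cons_of_mem _ hL, hrest⟩
    · rintro (h1 | ⟨L, hL, hrest⟩)
      · exact Or.inl (Or.inl h1)
      · rcases List.mem_cons.mp hL with rfl | hL'
        · exact Or.inl (Or.inr hrest)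
        · exact Or.inr ⟨L, hL', hrest⟩

lemma nodup_foldl_pvScanLen (terms : PySem.Set String) (pl : String) :
    ∀ (lengths : List Int) (acc : PySem.Set String), acc.Nodup →
    (lengths.foldl (pvScanLen terms pl) acc).Nodup := by
  intro lengths
  induction lengths with
  | nil => intro acc h; simpa using h
  | cons hd tl ih => intro acc h; exact ih _ (nodup_pvScanLen _ _ _ _ h)

-- A window of pl equal to a term t exists (for some collected length) iff t ∈ terms occurs in pl.
lemma window_iff (terms : PySem.Set String) (pl x : String) :
    (∃ L ∈ PySem.List.sorted (PySem.Set.ofList (terms.map PySem.Str.len)) (fun y => y) false,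
      ∃ i ∈ PySem.List.pyRange 0 (PySem.Str.len pl - L + 1) 1,
        PySem.Set.contains terms (PySem.Str.slice pl (some i) (some (i + L))) = true ∧
        PySem.Str.slice pl (some i) (some (i + L)) = x) ↔
    (x ∈ terms ∧ PySem.Str.isIn x pl = true) := by
  constructor
  · rintro ⟨L, hL, i, hi, hc, hg⟩
    rw [PySem.List.mem_sorted, PySem.Set.mem_ofList, List.mem_map] at hL
    obtain ⟨t, _, rfl⟩ := hL
    rw [PySem.List.mem_pyRange_one] at hi
    have hx : x ∈ terms := by rw [← hg]; exact (PySem.Set.contains_iff _ _).mp hc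
    refine ⟨hx, ?_⟩
    rw [PySem.Str.isIn_iff_infix, ← hg, PySem.Str.toList_slice, PySem.Chars.slice_eq_listSlice,
      PySem.List.slice_toNat _ hi.1 (by have := PySem.Str.len_eq t; omega)]
    exact (List.take_prefix _ _).isInfix.trans (List.drop_suffix _ _).isInfix
  · rintro ⟨hx, hin⟩
    rw [PySem.Str.isIn_iff_infix] at hin
    obtain ⟨pre, post, heq⟩ := hin
    have hlen := congrArg List.length heq
    simp only [List.length_append] at hlen
    refine ⟨PySem.Str.len x, ?_, (pre.length : Int), ?_, ?_, ?_⟩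
    · rw [PySem.List.mem_sorted, PySem.Set.mem_ofList, List.mem_map]
      exact ⟨x, hx, rfl⟩
    · rw [PySem.List.mem_pyRange_one, PySem.Str.len_eq, PySem.Str.len_eq]
      constructor
      · positivity
      · omega
    · have : PySem.Str.slice pl (some (pre.length : Int)) (some ((pre.length : Int) + PySem.Str.len x)) = x := by
        apply String.toList_inj.mp
        rw [PySem.Str.toList_slice, PySem.Chars.slice_eq_listSlice, PySem.Str.len_eq,
          PySem.List.slice_natCast_add, ← heq, List.append_assoc, List.drop_left, List.take_left]
      rw [this]; exact (PySem.Set.contains_iff _ _).mpr hx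
    · apply String.toList_inj.mp
      rw [PySem.Str.toList_slice, PySem.Chars.slice_eq_listSlice, PySem.Str.len_eq,
        PySem.List.slice_natCast_add, ← heq, List.append_assoc, List.drop_left, List.take_left]

-- The per-path found set has exactly as many elements as there are terms occurring in pl.
lemma len_found (terms : PySem.Set String) (hterms : terms.Nodup) (pl : String) :
    PySem.Set.len ((PySem.List.sorted (PySem.Set.ofList (terms.map PySem.Str.len)) (fun y => y) false).foldl
      (pvScanLen terms pl) ([] : PySem.Set String))
    = (terms.countP (fun t => PySem.Str.isIn t pl) : Int) := by
  have hperm : ((PySem.List.sorted (PySem.Set.ofList (terms.map PySem.Str.len)) (fun y => y) false).foldl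
      (pvScanLen terms pl) ([] : PySem.Set String)).Perm (terms.filter (fun t => PySem.Str.isIn t pl)) := by
    rw [List.perm_ext_iff_of_nodup
      (nodup_foldl_pvScanLen terms pl _ ([] : PySem.Set String) List.nodup_nil)
      (hterms.filter _)]
    intro a
    rw [mem_foldl_pvScanLen, List.mem_filter]
    simp only [List.not_mem_nil, false_or]
    exact window_iff terms pl a
  simp only [PySem.Set.len, hperm.length_eq, List.countP_eq_length_filter]

-- A's accumulation loop over a Nodup source starting from a disjoint accumulator is a filter.
lemma foldl_add_eq_filter (cond : String → Prop) [DecidablePred cond] :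
    ∀ (l acc : List String), l.Nodup → (∀ x ∈ l, x ∉ acc) →
    l.foldl (fun m p => if cond p then PySem.Set.add m p else m) acc
      = acc ++ l.filter (fun p => decide (cond p)) := by
  intro l
  induction l with
  | nil => intro acc _ _; simp
  | cons hd tl ih =>
    intro acc hnd hdis
    have hhd : hd ∉ acc := hdis hd (by simp)
    have hadd : PySem.Set.add acc hd = acc ++ [hd] := PySem.Set.add_of_not_mem hhd
    rw [List.foldl_cons, List.filter_cons]
    by_cases hc : cond hd
    · rw [if_pos hc, hadd, if_pos (by simpa using hc),
        ih (acc ++ [hd]) hnd.of_cons (by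
          intro x hx
          simp only [List.mem_append, List.mem_singleton]
          rintro (h1 | h2)
          · exact hdis x (List.mem_cons_of_mem _ hx) h1
          · exact (List.nodup_cons.mp hnd).1 (h2 ▸ hx))]
      simp
    · rw [if_neg hc, if_neg (by simpa using hc),
        ih acc hnd.of_cons (fun x hx => hdis x (List.mem_cons_of_mem _ hx))]

-- ===== VERDICT (by name: the statement is the Claim_ definition above) =====
theorem direct_path_matches_py_spec : Claim_equal_direct_path_matches_py := by
  intro file_analysis files keywords file_patterns _
  unfold Spec_direct_path_matches_py direct_path_matches_py direct_path_matches_py_alt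
  dsimp only
  have hpaths : (PySem.Set.union (PySem.Set.ofList (file_analysis.map Prod.fst)) (files.map Prod.fst)).Nodup :=
    PySem.Set.nodup_union _ _ (PySem.Set.nodup_ofList _)
  have hterms : (PySem.Set.union (PySem.Set.ofList (keywords.map PySem.Str.lower)) (file_patterns.map PySem.Str.lower)).Nodup :=
    PySem.Set.nodup_union _ _ (PySem.Set.nodup_ofList _)
  set P := PySem.Set.union (PySem.Set.ofList (file_analysis.map Prod.fst)) (files.map Prod.fst) with hP
  set T := PySem.Set.union (PySem.Set.ofList (keywords.map PySem.Str.lower)) (file_patterns.map PySem.Str.lower) with hT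
  have hdisj : ∀ x ∈ P, x ∉ (PySem.Set.empty : PySem.Set String) := by
    intro x _ h; simp [PySem.Set.empty] at h
  rw [foldl_add_eq_filter
      (fun path => 2 ≤ PySem.Set.len ((PySem.List.sorted (PySem.Set.ofList (T.map PySem.Str.len)) (fun x => x) false).foldl
        (pvScanLen T (PySem.Str.lower path)) PySem.Set.empty))
      P PySem.Set.empty hpaths hdisj]
  by_cases hT0 : T = []
  · rw [if_pos hT0]
    simp only [PySem.Set.empty, List.nil_append]
    symm
    rw [List.filter_eq_nil_iff]
    intro p _
    simp only [decide_eq_true_eq]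
    rw [len_found T hterms, hT0]
    simp
  · rw [if_neg hT0,
      foldl_add_eq_filter
        (fun path => 2 ≤ T.foldl (fun s t => if PySem.Str.isIn t (PySem.Str.lower path) then s + 1 else s) (0 : Int))
        P PySem.Set.empty hpaths hdisj]
    simp only [PySem.Set.empty, List.nil_append]
    apply List.filter_congr
    intro p _
    rw [decide_eq_decide, PySem.List.foldl_count_if, len_found T hterms]
    omega
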